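-- pv_equiv track=rewrite | github.com/Andres6936/GoblinCamp | build/boost-build/build/build_request.py | convert_command_line_element
-- ===== SOURCE A (Python) =====
-- def convert_command_line_element(e):
--
--     result = None
--     parts = e.split("/")
--     for p in parts:
--         m = p.split("=")
--         if len(m) > 1:
--             feature = m[0]
--             values = m[1].split(",")
--             lresult = [("<%s>%s" % (feature, v)) for v in values]
--         else:
--             lresult = p.split(",")
--
--         if p.find('-') == -1:
--             # FIXME: first port property.validate
--             # property.validate cannot handle subfeatures,
--             # so we avoid the check here.
--             #for p in lresult:
--             #    property.validate(p)
--             pass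
--
--         if not result:
--             result = lresult
--         else:
--             result = [e1 + "/" + e2 for e1 in result for e2 in lresult]
--
--     return result
-- ===== SOURCE B (Python) =====
-- def convert_command_line_element(e):
--     # Mixed-radix enumeration: parse each '/'-part into its option list, then
--     # generate combination number i for i in range(prod of lengths) by decoding
--     # i's mixed-radix digits (rightmost part = least significant digit).
--     options = []
--     for p in e.split("/"):
--         m = p.split("=")
--         if len(m) > 1:
--             options.append(["<%s>%s" % (m[0], v) for v in m[1].split(",")])
--         else:
--             options.append(p.split(","))
--     total = 1
--     for o in options:
--         total *= len(o)
--     result = []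
--     for i in range(total):
--         combo = []
--         rem = i
--         for o in reversed(options):
--             rem, d = divmod(rem, len(o))
--             combo.append(o[d])
--         combo.reverse()
--         result.append("/".join(combo))
--     return result
-- ===== Notes on version B (the rewrite author's own statement) =====
-- stated objective: alternative
-- what changed: Replaces A's incremental fold of list cross-products by mixed-radix enumeration: B computes total = product of the option counts and, for each index i in range(total), decodes i's mixed-radix digits with divmod to pick one value per '/'-part, so no intermediate combination lists are ever built.
import Mathlib
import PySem

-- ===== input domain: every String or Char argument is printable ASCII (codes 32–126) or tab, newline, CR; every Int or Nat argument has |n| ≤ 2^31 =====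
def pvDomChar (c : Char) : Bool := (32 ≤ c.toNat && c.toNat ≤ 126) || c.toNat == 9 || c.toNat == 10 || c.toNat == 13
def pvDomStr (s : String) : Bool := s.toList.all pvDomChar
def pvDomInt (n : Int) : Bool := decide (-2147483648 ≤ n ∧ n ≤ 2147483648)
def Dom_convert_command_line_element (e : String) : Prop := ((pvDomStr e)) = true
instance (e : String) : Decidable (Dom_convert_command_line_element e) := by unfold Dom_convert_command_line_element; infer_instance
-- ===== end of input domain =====

-- B replaces A's incremental fold of cross-product lists by mixed-radix enumeration: total =
-- product of the option counts, then each combination index is decoded digit by digit with divmod.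

-- ===== PORT A =====
-- Literal port of A's fold; strings are handled as List Char via PySem.Chars (the exact definitions
-- of Python's split).  The `p.find('-')` branch of A is `pass` and contributes nothing.  A's
-- `result` starts as None; since e.split("/") is never empty the final `result` is always a list,
-- so the final `.getD []` is unreachable (Python's `return result` never returns None).
def convert_command_line_element (e : String) : List String :=
  let parts := PySem.Chars.splitOn e.toList ['/']
  let result : Option (List (List Char)) := parts.foldl (fun result p =>
    let m := PySem.Chars.splitOn p ['=']
    let lresult :=
      if m.length > 1 then
        -- feature = m[0]; values = m[1].split(","); "<%s>%s" % (feature, v)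
        (PySem.Chars.splitOn m[1]! [',']).map (fun v => '<' :: m[0]! ++ '>' :: v)
      else
        PySem.Chars.splitOn p [',']
    match result with
    | none => some lresult                                   -- `if not result` (None case)
    | some r =>
      if r.isEmpty then some lresult                         -- `if not result` ([] case)
      else some (r.flatMap (fun e1 => lresult.map (fun e2 => e1 ++ '/' :: e2)))) none
  (result.getD []).map String.ofList

-- ===== PORT B =====
-- Literal port of Source B.  Python's divmod(rem, len(o)) is PySem.Int.floordiv / PySem.Int.mod
-- (divisor = length of a split result, hence ≥ 1, so divmod never raises); o[d] is pyGetD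
-- (d = rem % len(o) with rem ≥ 0 is always in range).  list.append is `acc ++ [x]`.
def convert_command_line_element_alt (e : String) : List String :=
  let options : List (List (List Char)) := (PySem.Chars.splitOn e.toList ['/']).foldl (fun acc p =>
    let m := PySem.Chars.splitOn p ['=']
    if m.length > 1 then
      acc ++ [(PySem.Chars.splitOn m[1]! [',']).map (fun v => '<' :: m[0]! ++ '>' :: v)]
    else
      acc ++ [PySem.Chars.splitOn p [',']]) []
  let total : Int := options.foldl (fun t o => t * (o.length : Int)) 1
  let result := (PySem.List.pyRange 0 total 1).foldl (fun result i =>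
    let st := options.reverse.foldl (fun (st : List (List Char) × Int) o =>
      let d := PySem.Int.mod st.2 (o.length : Int)
      (st.1 ++ [PySem.List.pyGetD o d []], PySem.Int.floordiv st.2 (o.length : Int))) ([], i)
    result ++ [st.1.reverse]) []
  result.map (fun c => String.ofList (PySem.Chars.join ['/'] c))

-- ===== PRECONDITION & SPEC =====
def Spec_convert_command_line_element (e : String) (out : List String) : Prop := out = convert_command_line_element_alt e
instance (e : String) (out : List String) : Decidable (Spec_convert_command_line_element e out) := by unfold Spec_convert_command_line_element; infer_instance

-- ===== CLAIM (what is proved, stated in full; the proofs are below) =====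
def Claim_equal_convert_command_line_element : Prop := ∀ (e : String), Dom_convert_command_line_element e → Spec_convert_command_line_element e (convert_command_line_element e)

-- ===== LEMMAS AND PROOFS =====

-- the parsing of one '/'-part (the same computation appears in both ports)
def pvParsePart (p : List Char) : List (List Char) :=
  let m := PySem.Chars.splitOn p ['=']
  if m.length > 1 then
    (PySem.Chars.splitOn m[1]! [',']).map (fun v => '<' :: m[0]! ++ '>' :: v)
  else
    PySem.Chars.splitOn p [',']

-- the common reference value both ports are reduced to: the Cartesian product, leftmost slowest
def pvProduct : List (List (List Char)) → List (List (List Char))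
  | [] => [[]]
  | l :: ls => l.flatMap (fun x => (pvProduct ls).map (fun c => x :: c))

-- A's loop body as a named function (definitionally the lambda in the port of A)
def pvStep (result : Option (List (List Char))) (p : List Char) : Option (List (List Char)) :=
  let m := PySem.Chars.splitOn p ['=']
  let lresult :=
    if m.length > 1 then
      (PySem.Chars.splitOn m[1]! [',']).map (fun v => '<' :: m[0]! ++ '>' :: v)
    else
      PySem.Chars.splitOn p [',']
  match result with
  | none => some lresult
  | some r =>
    if r.isEmpty then some lresult
    else some (r.flatMap (fun e1 => lresult.map (fun e2 => e1 ++ '/' :: e2)))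

theorem pvSplitOn_go_ne_nil (sep : List Char) :
    ∀ (fuel : Nat) (l cur : List Char) (acc : List (List Char)),
      PySem.Chars.splitOn.go sep fuel l cur acc ≠ [] := by
  intro fuel
  induction fuel with
  | zero => intro l cur acc; simp [PySem.Chars.splitOn.go]
  | succ n ih =>
    intro l cur acc
    cases l with
    | nil => simp [PySem.Chars.splitOn.go]
    | cons c rest =>
      rw [PySem.Chars.splitOn.go]
      split
      · exact ih _ _ _
      · exact ih _ _ _

theorem pvSplitOn_ne_nil (s sep : List Char) : PySem.Chars.splitOn s sep ≠ [] := by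
  unfold PySem.Chars.splitOn
  exact pvSplitOn_go_ne_nil sep _ _ _ _

theorem pvParsePart_ne_nil (p : List Char) : pvParsePart p ≠ [] := by
  have h1 := pvSplitOn_ne_nil ((PySem.Chars.splitOn p ['='])[1]!) [',']
  have h2 := pvSplitOn_ne_nil p [',']
  unfold pvParsePart
  dsimp only
  split <;> simp_all

-- ============ A-side: A's fold = join over pvProduct ============

-- the combining step of A's fold, on already-list state
def pvCombine (r l : List (List Char)) : List (List Char) :=
  r.flatMap (fun e1 => l.map (fun e2 => e1 ++ '/' :: e2))

theorem pvCombine_ne_nil {r l : List (List Char)} (hr : r ≠ []) (hl : l ≠ []) :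
    pvCombine r l ≠ [] := by
  unfold pvCombine
  cases r with
  | nil => exact absurd rfl hr
  | cons x xs =>
    cases l with
    | nil => exact absurd rfl hl
    | cons y ys => simp

theorem pvJoin_shift (x z : List Char) (c : List (List Char)) :
    PySem.Chars.join ['/'] ((x ++ '/' :: z) :: c) = PySem.Chars.join ['/'] (x :: z :: c) := by
  cases c with
  | nil => simp [PySem.Chars.join_singleton, PySem.Chars.join_cons_cons]
  | cons d ds => simp [PySem.Chars.join_cons_cons]

theorem pvFold_eq_product :
    ∀ (ls : List (List Char)) (r : List (List Char)),
      (ls.map pvParsePart).foldl pvCombine r =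
        r.flatMap (fun x =>
          (pvProduct (ls.map pvParsePart)).map (fun c => PySem.Chars.join ['/'] (x :: c))) := by
  intro ls
  induction ls with
  | nil =>
    intro r
    simp [pvProduct, PySem.Chars.join_singleton]
  | cons p ps ih =>
    intro r
    simp only [List.map_cons, List.foldl_cons]
    rw [ih (pvCombine r (pvParsePart p))]
    simp only [pvCombine, pvProduct, List.flatMap_assoc, List.flatMap_map, List.map_flatMap,
      List.map_map]
    congr 1
    funext x
    congr 1
    funext z
    congr 1
    funext c
    exact pvJoin_shift x z c

theorem pvOptFold_eq :
    ∀ (ls : List (List Char)) (r : List (List Char)), r ≠ [] →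
      ls.foldl pvStep (some r) =
      some ((ls.map pvParsePart).foldl pvCombine r) := by
  intro ls
  induction ls with
  | nil => intro r _; simp
  | cons p ps ih =>
    intro r hr
    obtain ⟨x, xs, rfl⟩ : ∃ x xs, r = x :: xs := by
      cases r with
      | nil => exact absurd rfl hr
      | cons x xs => exact ⟨x, xs, rfl⟩
    simp only [List.foldl_cons, List.map_cons]
    rw [show pvStep (some (x :: xs)) p = some (pvCombine (x :: xs) (pvParsePart p)) by
      simp [pvStep, pvParsePart, pvCombine]]
    exact ih (pvCombine (x :: xs) (pvParsePart p))
      (pvCombine_ne_nil (by simp) (pvParsePart_ne_nil p))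

theorem pvMainA (parts : List (List Char)) (h : parts ≠ []) :
    ((parts.foldl pvStep none).getD []).map String.ofList =
      (pvProduct (parts.map pvParsePart)).map
        (fun combo => String.ofList (PySem.Chars.join ['/'] combo)) := by
  cases parts with
  | nil => exact absurd rfl h
  | cons p ps =>
    simp only [List.foldl_cons]
    rw [show pvStep none p = some (pvParsePart p) from rfl]
    rw [pvOptFold_eq ps (pvParsePart p) (pvParsePart_ne_nil p)]
    rw [Option.getD_some, pvFold_eq_product ps (pvParsePart p)]
    simp only [List.map_cons, pvProduct, List.map_flatMap, List.map_map]
    rfl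

-- ============ B-side: mixed-radix enumeration = pvProduct ============

-- product of the option counts
def pvT (ls : List (List (List Char))) : Nat := (ls.map List.length).prod

-- structural form of B's inner reverse-fold: (combo in ORIGINAL order, final rem)
def pvDecode : List (List (List Char)) → Int → List (List Char) × Int
  | [], i => ([], i)
  | l :: ls, i =>
    let s := pvDecode ls i
    (PySem.List.pyGetD l (PySem.Int.mod s.2 (l.length : Int)) [] :: s.1,
     PySem.Int.floordiv s.2 (l.length : Int))

-- B's reverse-foldl computes pvDecode with the combo reversed
theorem pvRevFold_eq (ls : List (List (List Char))) (i : Int) :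
    ls.reverse.foldl (fun (st : List (List Char) × Int) o =>
      (st.1 ++ [PySem.List.pyGetD o (PySem.Int.mod st.2 (o.length : Int)) []],
       PySem.Int.floordiv st.2 (o.length : Int))) ([], i)
    = ((pvDecode ls i).1.reverse, (pvDecode ls i).2) := by
  induction ls generalizing i with
  | nil => simp [pvDecode]
  | cons l ls ih =>
    simp only [List.reverse_cons, List.foldl_append, ih, List.foldl_cons, List.foldl_nil, pvDecode]

theorem pvT_pos (ls : List (List (List Char))) (h : ∀ l ∈ ls, l ≠ []) : 0 < pvT ls :=
  List.prod_pos (fun x hx => by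
    obtain ⟨y, hy, rfl⟩ := List.mem_map.mp hx
    exact List.length_pos_iff.mpr (h y hy))

-- digit/carry split: decoding q*T + r (0 ≤ r < T) yields r's combo and carries q out
theorem pvDecode_split (ls : List (List (List Char))) (h : ∀ l ∈ ls, l ≠ []) :
    ∀ (q r : Int), 0 ≤ r → r < (pvT ls : Int) →
      pvDecode ls (q * (pvT ls : Int) + r) = ((pvDecode ls r).1, q) := by
  induction ls with
  | nil =>
    intro q r h0 h1
    simp only [pvT, List.map_nil, List.prod_nil, Nat.cast_one] at h1 ⊢
    have : r = 0 := by omega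
    simp [pvDecode, this]
  | cons l ls ih =>
    intro q r h0 h1
    have hl : l ≠ [] := h l (by simp)
    have hn : (0:Int) < (l.length : Int) := by exact_mod_cast List.length_pos_iff.mpr hl
    have hT : (pvT (l :: ls) : Int) = (l.length : Int) * (pvT ls : Int) := by
      simp [pvT]
    set T' : Int := (pvT ls : Int) with hT'
    have hT0 : 0 < T' := by
      rw [hT']
      exact_mod_cast pvT_pos ls (fun x hx => h x (List.mem_cons_of_mem _ hx))
    have hdm : T' * (r / T') + r % T' = r := Int.mul_ediv_add_emod r T'
    have hrw : q * (pvT (l :: ls) : Int) + r = (q * l.length + r / T') * T' + r % T' := by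
      calc q * (pvT (l :: ls) : Int) + r
          = q * ((l.length : Int) * T') + (T' * (r / T') + r % T') := by rw [hdm, hT]
        _ = (q * l.length + r / T') * T' + r % T' := by ring
    have hr'0 : 0 ≤ r % T' := Int.emod_nonneg r (by omega)
    have hr'1 : r % T' < T' := Int.emod_lt_of_pos r hT0
    have hd0 : 0 ≤ r / T' := Int.ediv_nonneg h0 (le_of_lt hT0)
    have hd1 : r / T' < (l.length : Int) := by
      rw [hT] at h1
      exact Int.ediv_lt_of_lt_mul hT0 (by linarith [Int.mul_comm (l.length : Int) T'])
    have ih1 := ih (fun x hx => h x (List.mem_cons_of_mem _ hx)) (q * l.length + r / T')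
      (r % T') hr'0 hr'1
    have ih2 := ih (fun x hx => h x (List.mem_cons_of_mem _ hx)) (r / T') (r % T') hr'0 hr'1
    have hrr : r = (r / T') * T' + r % T' := by rw [mul_comm]; exact hdm.symm
    simp only [pvDecode]
    rw [hrw, ih1]
    conv_rhs => rw [hrr, ih2]
    simp only [Prod.mk.injEq]
    constructor
    · congr 2
      rw [PySem.Int.mod_eq_emod_of_pos hn, PySem.Int.mod_eq_emod_of_pos hn]
      rw [show q * (l.length : Int) + r / T' = r / T' + (l.length : Int) * q by ring,
        Int.add_mul_emod_self_left]
    · rw [PySem.Int.floordiv_eq_ediv_of_pos hn]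
      rw [show q * (l.length : Int) + r / T' = r / T' + (l.length : Int) * q by ring,
        Int.add_mul_ediv_left _ _ (by omega : (l.length : Int) ≠ 0)]
      rw [Int.ediv_eq_zero_of_lt hd0 hd1]
      omega

-- splitting range(0, a*b) into an outer digit and an inner remainder
theorem pvRange_mul_split (a b : Nat) :
    PySem.List.pyRange 0 ((a * b : Nat) : Int) 1 =
      (PySem.List.pyRange 0 (a : Int) 1).flatMap (fun q =>
        (PySem.List.pyRange 0 (b : Int) 1).map (fun r => q * (b : Int) + r)) := by
  induction a with
  | zero => simp [PySem.List.pyRange_zero_nat]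
  | succ n ih =>
    have h1 : ((n + 1) * b : Nat) = n * b + b := by ring
    have h2 : PySem.List.pyRange 0 (((n + 1) * b : Nat) : Int) 1 =
        PySem.List.pyRange 0 ((n * b : Nat) : Int) 1 ++
        PySem.List.pyRange ((n * b : Nat) : Int) (((n + 1) * b : Nat) : Int) 1 := by
      refine PySem.List.pyRange_one_append 0 _ _ (Int.natCast_nonneg _) ?_
      push_cast [h1]; omega
    have h3 : PySem.List.pyRange ((n : Int) : Int) ((n : Int) + 1) 1 = [(n : Int)] :=
      PySem.List.pyRange_one_singleton _
    rw [h2, ih]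
    have h4 : PySem.List.pyRange 0 ((n + 1 : Nat) : Int) 1 =
        PySem.List.pyRange 0 (n : Int) 1 ++ [(n : Int)] := by
      push_cast
      rw [PySem.List.pyRange_one_succ_right (Int.natCast_nonneg n)]
    rw [h4, List.flatMap_append]
    congr 1
    simp only [List.flatMap_cons, List.flatMap_nil, List.append_nil]
    -- shifted inner range
    rw [PySem.List.pyRange_one (((n * b : Nat)) : Int), PySem.List.pyRange_one 0 (b : Int)]
    have hlen : ((((n + 1) * b : Nat) : Int) - ((n * b : Nat) : Int)).toNat = ((b : Int) - 0).toNat := by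
      push_cast [h1]; omega
    rw [hlen]
    simp only [List.map_map]
    apply List.map_congr_left
    intro k _
    simp only [Function.comp_apply]
    push_cast
    ring

-- the enumeration lemma: mapping the decoder over range(total) is the Cartesian product
theorem pvEnum_eq_product (ls : List (List (List Char))) (h : ∀ l ∈ ls, l ≠ []) :
    (PySem.List.pyRange 0 ((pvT ls : Nat) : Int) 1).map (fun i => (pvDecode ls i).1)
      = pvProduct ls := by
  induction ls with
  | nil =>
    have h01 : ((pvT ([] : List (List (List Char))) : Nat) : Int) = 0 + 1 := by simp [pvT]
    rw [h01, PySem.List.pyRange_one_singleton]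
    simp [pvDecode, pvProduct]
  | cons l ls ih =>
    have hl : l ≠ [] := h l (by simp)
    have hT : pvT (l :: ls) = l.length * pvT ls := by simp [pvT]
    have hT0 : 0 < (pvT ls : Int) := by
      exact_mod_cast pvT_pos ls (fun x hx => h x (List.mem_cons_of_mem _ hx))
    rw [hT, pvRange_mul_split l.length (pvT ls)]
    rw [List.map_flatMap]
    simp only [pvProduct]
    -- l = map (fun q => l[q]) (range len l)
    have hidx : (PySem.List.pyRange 0 (l.length : Int) 1).map
        (fun q => PySem.List.pyGetD l q []) = l := by
      have := PySem.List.map_pyGetD_pyRange_zero (xs := l) (d := ([] : List Char))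
      simpa using this
    conv_rhs => rw [← hidx]
    rw [List.flatMap_map]
    apply List.flatMap_congr
    intro q hq
    rw [PySem.List.mem_pyRange_one] at hq
    rw [List.map_map]
    rw [← ih (fun x hx => h x (List.mem_cons_of_mem _ hx))]
    rw [List.map_map]
    apply List.map_congr_left
    intro r hr
    rw [PySem.List.mem_pyRange_one] at hr
    have hsplit := pvDecode_split ls (fun x hx => h x (List.mem_cons_of_mem _ hx)) q r hr.1 hr.2
    have hmq : PySem.Int.mod q (l.length : Int) = q := by
      rw [PySem.Int.mod_eq_emod_of_pos (by exact_mod_cast List.length_pos_iff.mpr hl)]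
      exact Int.emod_eq_of_lt hq.1 hq.2
    show (pvDecode (l :: ls) (q * (pvT ls : Int) + r)).1 = PySem.List.pyGetD l q [] :: (pvDecode ls r).1
    rw [show pvDecode (l :: ls) (q * (pvT ls : Int) + r) =
        (PySem.List.pyGetD l (PySem.Int.mod (pvDecode ls (q * (pvT ls : Int) + r)).2 (l.length : Int)) []
          :: (pvDecode ls (q * (pvT ls : Int) + r)).1,
         PySem.Int.floordiv (pvDecode ls (q * (pvT ls : Int) + r)).2 (l.length : Int)) from rfl]
    rw [hsplit]
    simp only [hmq]

-- B's step for options is exactly appending pvParsePart p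
theorem pvOptStep_eq :
    (fun (acc : List (List (List Char))) p =>
      let m := PySem.Chars.splitOn p ['=']
      if m.length > 1 then
        acc ++ [(PySem.Chars.splitOn m[1]! [',']).map (fun v => '<' :: m[0]! ++ '>' :: v)]
      else
        acc ++ [PySem.Chars.splitOn p [',']])
    = (fun acc p => acc ++ [pvParsePart p]) := by
  funext acc p
  simp only [pvParsePart]
  split <;> rfl

theorem pvOptions_eq (parts : List (List Char)) :
    parts.foldl (fun (acc : List (List (List Char))) p =>
      let m := PySem.Chars.splitOn p ['=']
      if m.length > 1 then
        acc ++ [(PySem.Chars.splitOn m[1]! [',']).map (fun v => '<' :: m[0]! ++ '>' :: v)]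
      else
        acc ++ [PySem.Chars.splitOn p [',']]) []
    = parts.map pvParsePart := by
  rw [pvOptStep_eq]
  exact (PySem.List.foldl_append_singleton_eq_map pvParsePart parts []).trans (List.nil_append _)

theorem pvTotal_eq (ls : List (List (List Char))) :
    ∀ t : Int, ls.foldl (fun t o => t * (o.length : Int)) t = t * (pvT ls : Int) := by
  induction ls with
  | nil => intro t; simp [pvT]
  | cons l ls ih =>
    intro t
    simp only [List.foldl_cons, ih, pvT, List.map_cons, List.prod_cons]
    push_cast
    ring

theorem pvMainB (parts : List (List Char)) (h : ∀ l ∈ parts.map pvParsePart, l ≠ []) :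
    ((PySem.List.pyRange 0 ((parts.map pvParsePart).foldl (fun t o => t * (o.length : Int)) 1) 1).foldl
      (fun result i =>
        let st := (parts.map pvParsePart).reverse.foldl (fun (st : List (List Char) × Int) o =>
          (st.1 ++ [PySem.List.pyGetD o (PySem.Int.mod st.2 (o.length : Int)) []],
           PySem.Int.floordiv st.2 (o.length : Int))) ([], i)
        result ++ [st.1.reverse]) []).map (fun c => String.ofList (PySem.Chars.join ['/'] c))
    = (pvProduct (parts.map pvParsePart)).map
        (fun combo => String.ofList (PySem.Chars.join ['/'] combo)) := by
  set ls := parts.map pvParsePart with hls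
  have h1 : ls.foldl (fun t o => t * (o.length : Int)) 1 = ((pvT ls : Nat) : Int) := by
    rw [pvTotal_eq]; ring
  rw [h1]
  rw [PySem.List.foldl_append_singleton_eq_map]
  congr 1
  have : ∀ i : Int,
      ((ls.reverse.foldl (fun (st : List (List Char) × Int) o =>
          (st.1 ++ [PySem.List.pyGetD o (PySem.Int.mod st.2 (o.length : Int)) []],
           PySem.Int.floordiv st.2 (o.length : Int))) ([], i)).1).reverse
        = (pvDecode ls i).1 := by
    intro i
    rw [pvRevFold_eq]
    exact List.reverse_reverse _
  calc (PySem.List.pyRange 0 ((pvT ls : Nat) : Int) 1).map (fun i =>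
          ((ls.reverse.foldl (fun (st : List (List Char) × Int) o =>
            (st.1 ++ [PySem.List.pyGetD o (PySem.Int.mod st.2 (o.length : Int)) []],
             PySem.Int.floordiv st.2 (o.length : Int))) ([], i)).1).reverse)
      = (PySem.List.pyRange 0 ((pvT ls : Nat) : Int) 1).map (fun i => (pvDecode ls i).1) := by
        apply List.map_congr_left; intro i _; exact this i
    _ = pvProduct ls := pvEnum_eq_product ls h

-- ===== VERDICT (by name: the statement is the Claim_ definition above) =====
theorem convert_command_line_element_spec : Claim_equal_convert_command_line_element := by
  intro e _
  show convert_command_line_element e = convert_command_line_element_alt e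
  refine (pvMainA (PySem.Chars.splitOn e.toList ['/']) (pvSplitOn_ne_nil _ _)).trans ?_
  have hne : ∀ l ∈ (PySem.Chars.splitOn e.toList ['/']).map pvParsePart, l ≠ [] := by
    intro l hl
    obtain ⟨p, _, rfl⟩ := List.mem_map.mp hl
    exact pvParsePart_ne_nil p
  unfold convert_command_line_element_alt
  rw [pvOptions_eq]
  exact (pvMainB _ hne).symm
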